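-- pv_equiv track=rewrite | github.com/jadenvan/PatentScout | modules/claim_parser.py | _find_transition
-- ===== SOURCE A (Python) =====
-- _TRANSITIONAL_PHRASES = [
--     "consisting essentially of",
--     "consisting of",
--     "comprising",
--     "including",
--     "characterized by",
--     "wherein the improvement comprises",
--     "having",
--     "which comprises",
--     "that comprises",
-- ]
--
-- def _find_transition(text: str) -> tuple[str, int]:
--     """
--     Return (transitional_phrase, index_in_text) for the first match.
--     Returns ('', -1) if none found.
--     """
--     lower = text.lower()
--     best = ("", -1)
--     for phrase in _TRANSITIONAL_PHRASES:
--         idx = lower.find(phrase)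
--         if idx != -1:
--             if best[1] == -1 or idx < best[1]:
--                 best = (phrase, idx)
--     return best
-- ===== SOURCE B (Python) =====
-- _TRANSITIONAL_PHRASES = [
--     "consisting essentially of",
--     "consisting of",
--     "comprising",
--     "including",
--     "characterized by",
--     "wherein the improvement comprises",
--     "having",
--     "which comprises",
--     "that comprises",
-- ]
--
-- def _find_transition(text: str) -> tuple[str, int]:
--     """
--     Return (transitional_phrase, index_in_text) for the first match.
--     Returns ('', -1) if none found.
--     """
--     lower = text.lower()
--     for i in range(len(lower)):
--         for phrase in _TRANSITIONAL_PHRASES: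
--             if lower.startswith(phrase, i):
--                 return (phrase, i)
--     return ("", -1)
-- ===== Notes on version B (the rewrite author's own statement) =====
-- stated objective: alternative
-- what changed: Replaced nine independent str.find passes with min/tie-break tracking by a single left-to-right position scan that returns at the first position where any phrase matches (phrases checked in list order); since no phrase is a prefix of another, the earliest-position/first-in-list semantics coincide exactly.
import Mathlib
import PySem

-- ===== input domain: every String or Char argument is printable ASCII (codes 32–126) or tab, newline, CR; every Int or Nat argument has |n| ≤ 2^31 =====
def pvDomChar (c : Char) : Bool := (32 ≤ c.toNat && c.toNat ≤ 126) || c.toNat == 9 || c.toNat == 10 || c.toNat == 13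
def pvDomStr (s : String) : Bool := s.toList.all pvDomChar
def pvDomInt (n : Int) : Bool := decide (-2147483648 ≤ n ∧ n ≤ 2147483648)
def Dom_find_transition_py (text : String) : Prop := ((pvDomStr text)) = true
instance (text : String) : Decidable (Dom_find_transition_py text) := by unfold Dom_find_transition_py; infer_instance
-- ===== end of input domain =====

-- B replaces nine independent find passes with min/tie-break tracking by a single
-- left-to-right position scan returning at the first position where any phrase matches
-- (phrases checked in list order); same cost class, different strategy (objective: alternative).

def pvPhrases : List String :=
  ["consisting essentially of", "consisting of", "comprising", "including",
   "characterized by", "wherein the improvement comprises", "having",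
   "which comprises", "that comprises"]

-- ===== PORT A =====
def find_transition_py (text : String) : String × Int :=
  let lower := PySem.Str.lower text
  pvPhrases.foldl
    (fun best phrase =>
      let idx := PySem.Str.find lower phrase
      if idx ≠ -1 then
        if best.2 = -1 ∨ idx < best.2 then (phrase, idx) else best
      else best)
    ("", -1)

-- ===== PORT B =====
-- inner 'for phrase: if lower.startswith(phrase, i): return' loop
def pvFirstMatch : List String → List Char → Option String
  | [], _ => none
  | p :: ps, v => if PySem.Chars.startswith v p.toList then some p else pvFirstMatch ps v

-- outer 'for i in range(len(lower))' loop; startswith(phrase, i) checked on the i-th suffix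
def pvScan : List Char → Nat → String × Int
  | [], _ => ("", -1)
  | c :: t, i =>
    match pvFirstMatch pvPhrases (c :: t) with
    | some p => (p, (i : Int))
    | none => pvScan t (i + 1)

def find_transition_py_alt (text : String) : String × Int :=
  pvScan (PySem.Chars.lower text.toList) 0

-- ===== PRECONDITION & SPEC =====
def Spec_find_transition_py (text : String) (out : String × Int) : Prop := out = find_transition_py_alt text
instance (text : String) (out : String × Int) : Decidable (Spec_find_transition_py text out) := by unfold Spec_find_transition_py; infer_instance

-- ===== CLAIM (what is proved, stated in full; the proofs are below) =====
def Claim_equal_find_transition_py : Prop := ∀ (text : String), Dom_find_transition_py text → Spec_find_transition_py text (find_transition_py text)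

-- ===== LEMMAS AND PROOFS =====

def pvF (cs : List Char) (p : String) : Int := PySem.Chars.find cs p.toList

def pvStep (cs : List Char) (b : String × Int) (p : String) : String × Int :=
  if pvF cs p ≠ -1 then
    if b.2 = -1 ∨ pvF cs p < b.2 then (p, pvF cs p) else b
  else b

-- right-to-left "best" of a phrase list: first phrase with minimal find index
def pvBestOf (cs : List Char) : List String → String × Int
  | [] => ("", -1)
  | p :: ps =>
    let r := pvBestOf cs ps
    if pvF cs p = -1 then r
    else if r.2 = -1 ∨ pvF cs p ≤ r.2 then (p, pvF cs p) else r

def pvMerge (b r : String × Int) : String × Int :=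
  if r.2 = -1 then b else if b.2 = -1 ∨ r.2 < b.2 then r else b

theorem pvFoldl_eq (cs : List Char) :
    ∀ (ps : List String) (b : String × Int),
      List.foldl (pvStep cs) b ps = pvMerge b (pvBestOf cs ps) := by
  intro ps
  induction ps with
  | nil => intro b; simp [pvBestOf, pvMerge]
  | cons p ps ih =>
    intro b
    simp only [List.foldl_cons, ih]
    rcases hr : pvBestOf cs ps with ⟨q, n⟩
    simp only [pvBestOf, pvStep, pvMerge, hr]
    by_cases h1 : pvF cs p = -1 <;>
      by_cases h2 : n = -1 <;>
        by_cases h3 : b.2 = -1 <;>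
          split_ifs <;> simp_all <;> omega

theorem pvBestOf_shape (cs : List Char) (ps : List String) :
    pvBestOf cs ps = ("", -1) ∨
      ∃ q ∈ ps, pvBestOf cs ps = (q, pvF cs q) ∧ pvF cs q ≠ -1 := by
  induction ps with
  | nil => left; rfl
  | cons p ps ih =>
    simp only [pvBestOf]
    by_cases h1 : pvF cs p = -1
    · simp only [h1, if_pos rfl, if_true]
      rcases ih with h | ⟨q, hq, he, hne⟩
      · left; simpa [h1] using h
      · right; exact ⟨q, List.mem_cons_of_mem _ hq, by simpa [h1] using he, hne⟩
    · rcases ih with h | ⟨q, hq, he, hne⟩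
      · right
        refine ⟨p, List.mem_cons_self .., ?_, h1⟩
        simp [h1, h]
      · by_cases h2 : (pvBestOf cs ps).2 = -1 ∨ pvF cs p ≤ (pvBestOf cs ps).2
        · right; exact ⟨p, List.mem_cons_self .., by simp [h1, h2], h1⟩
        · right
          refine ⟨q, List.mem_cons_of_mem _ hq, ?_, hne⟩
          have h2' : ¬ (pvF cs q = -1 ∨ pvF cs p ≤ pvF cs q) := by
            rw [he] at h2; simpa using h2
          simp [pvBestOf, h1, he, h2']

theorem pvBestOf_none (cs : List Char) (ps : List String)
    (h : ∀ p ∈ ps, pvF cs p = -1) : pvBestOf cs ps = ("", -1) := by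
  induction ps with
  | nil => rfl
  | cons p ps ih =>
    have hp := h p (List.mem_cons_self ..)
    have := ih (fun q hq => h q (List.mem_cons_of_mem _ hq))
    simp [pvBestOf, hp, this]

theorem pvBestOf_min (cs : List Char) (ps : List String) (p₀ : String)
    (h₀ : p₀ ∈ ps) (hf : pvF cs p₀ ≠ -1)
    (hq : ∀ q ∈ ps, q ≠ p₀ → pvF cs q = -1 ∨ pvF cs p₀ < pvF cs q) :
    pvBestOf cs ps = (p₀, pvF cs p₀) := by
  induction ps with
  | nil => cases h₀
  | cons p ps ih =>
    rcases List.mem_cons.mp h₀ with rfl | hmem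
    · simp only [pvBestOf]
      rcases pvBestOf_shape cs ps with h | ⟨q, hqm, he, hne⟩
      · simp [h, hf]
      · have hle : pvF cs p₀ ≤ pvF cs q := by
          by_cases hqp : q = p₀
          · simp [hqp]
          · rcases hq q (List.mem_cons_of_mem _ hqm) hqp with h' | h'
            · exact absurd h' hne
            · omega
        simp [he, hf, hle]
    · by_cases hpp : p = p₀
      · subst hpp
        have hrec := ih hmem fun q hq' h' => hq q (List.mem_cons_of_mem _ hq') h'
        simp [pvBestOf, hrec, hf]
      · have hrec := ih hmem fun q hq' h' => hq q (List.mem_cons_of_mem _ hq') h'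
        rcases hq p (List.mem_cons_self ..) hpp with h' | h'
        · simp [pvBestOf, hrec, h']
        · have hb : -1 ≤ pvF cs p₀ := PySem.Chars.neg_one_le_find cs p₀.toList
          have h1 : pvF cs p ≠ -1 := by omega
          have hcond : ¬ (pvF cs p₀ = -1 ∨ pvF cs p ≤ pvF cs p₀) := by omega
          simp [pvBestOf, hrec, h1, hcond]

theorem pvFirstMatch_none_iff (ps : List String) (v : List Char) :
    pvFirstMatch ps v = none ↔ ∀ p ∈ ps, ¬ p.toList <+: v := by
  induction ps with
  | nil => simp [pvFirstMatch]
  | cons p ps ih =>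
    by_cases h : PySem.Chars.startswith v p.toList
    · have := (PySem.Chars.startswith_iff v p.toList).mp h
      simp [pvFirstMatch, h, this]
    · have hnp : ¬ p.toList <+: v := fun hp =>
        h ((PySem.Chars.startswith_iff v p.toList).mpr hp)
      simp [pvFirstMatch, h, ih, hnp]

theorem pvFirstMatch_some (ps : List String) (v : List Char) (p : String)
    (h : pvFirstMatch ps v = some p) : p ∈ ps ∧ p.toList <+: v := by
  induction ps with
  | nil => simp [pvFirstMatch] at h
  | cons q ps ih =>
    by_cases hs : PySem.Chars.startswith v q.toList
    · simp only [pvFirstMatch, hs, if_pos, Option.some.injEq] at h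
      cases h
      exact ⟨List.mem_cons_self .., (PySem.Chars.startswith_iff v _).mp hs⟩
    · simp only [pvFirstMatch, hs, if_neg] at h
      obtain ⟨h1, h2⟩ := ih h
      exact ⟨List.mem_cons_of_mem _ h1, h2⟩

theorem pvFirstMatch_isSome (ps : List String) (v : List Char)
    (h : ∃ p ∈ ps, p.toList <+: v) : (pvFirstMatch ps v).isSome := by
  rcases hm : pvFirstMatch ps v with _ | p
  · obtain ⟨p, hp, hpre⟩ := h
    exact absurd hpre ((pvFirstMatch_none_iff ps v).mp hm p hp)
  · rfl

theorem pvPhrases_ne_nil : ∀ p ∈ pvPhrases, p.toList ≠ [] := by decide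

theorem pvPhrases_no_prefix :
    ∀ p ∈ pvPhrases, ∀ q ∈ pvPhrases, p.toList <+: q.toList → p = q := by decide

theorem pvScan_none (cs : List Char)
    (h : ∀ j, pvFirstMatch pvPhrases (cs.drop j) = none) :
    ∀ i, pvScan cs i = ("", -1) := by
  induction cs with
  | nil => intro i; rfl
  | cons c t ih =>
    intro i
    have h0 := h 0
    simp only [List.drop_zero] at h0
    simp only [pvScan, h0]
    exact ih (fun j => h (j + 1)) (i + 1)

theorem pvScan_found :
    ∀ (j : Nat) (cs : List Char) (p : String) (i : Nat),
      pvFirstMatch pvPhrases (cs.drop j) = some p →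
      (∀ k < j, pvFirstMatch pvPhrases (cs.drop k) = none) →
      pvScan cs i = (p, (i : Int) + (j : Int)) := by
  intro j
  induction j with
  | zero =>
    intro cs p i hsome _
    cases cs with
    | nil =>
      simp only [List.drop_nil] at hsome
      obtain ⟨_, hpre⟩ := pvFirstMatch_some _ _ _ hsome
      simp only [List.prefix_nil] at hpre
      exact absurd hpre (pvPhrases_ne_nil p (pvFirstMatch_some _ _ _ hsome).1)
    | cons c t =>
      simp only [List.drop_zero] at hsome
      simp [pvScan, hsome]
  | succ j ih =>
    intro cs p i hsome hmin
    cases cs with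
    | nil =>
      simp only [List.drop_nil] at hsome
      obtain ⟨hmem, hpre⟩ := pvFirstMatch_some _ _ _ hsome
      simp only [List.prefix_nil] at hpre
      exact absurd hpre (pvPhrases_ne_nil p hmem)
    | cons c t =>
      have h0 := hmin 0 (Nat.succ_pos j)
      simp only [List.drop_zero] at h0
      simp only [pvScan, h0]
      have := ih t p (i + 1) (by simpa using hsome)
        (fun k hk => by simpa using hmin (k + 1) (by omega))
      rw [this]
      simp only [Prod.mk.injEq, true_and]
      push_cast
      ring

theorem pvScan_eq_pvBestOf (cs : List Char) :
    pvScan cs 0 = pvBestOf cs pvPhrases := by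
  by_cases hM : ∃ j, (pvFirstMatch pvPhrases (cs.drop j)).isSome
  · -- some phrase matches somewhere; j₀ = least such position
    set j₀ := Nat.find hM with hj₀def
    have hj₀ : (pvFirstMatch pvPhrases (cs.drop j₀)).isSome := Nat.find_spec hM
    have hmin : ∀ k < j₀, pvFirstMatch pvPhrases (cs.drop k) = none := fun k hk =>
      Option.not_isSome_iff_eq_none.mp (Nat.find_min hM hk)
    rcases hsome : pvFirstMatch pvPhrases (cs.drop j₀) with _ | p₀
    · rw [hsome] at hj₀; simp at hj₀
    obtain ⟨hmem, hpre⟩ := pvFirstMatch_some _ _ _ hsome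
    -- find cs p₀ = j₀
    have hinfix : 0 ≤ PySem.Chars.find cs p₀.toList := by
      rw [PySem.Chars.find_nonneg_iff, ← PySem.Chars.isIn_iff_infix,
        ← PySem.Chars.exists_prefix_drop_iff_isIn]
      exact ⟨j₀, hpre⟩
    obtain ⟨hfpre, hffirst⟩ := PySem.Chars.find_spec hinfix
    have hle : (PySem.Chars.find cs p₀.toList).toNat ≤ j₀ := by
      by_contra h
      exact hffirst j₀ (by omega) hpre
    have hge : j₀ ≤ (PySem.Chars.find cs p₀.toList).toNat :=
      Nat.find_min' hM (pvFirstMatch_isSome _ _ ⟨p₀, hmem, hfpre⟩)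
    have hfp₀ : pvF cs p₀ = (j₀ : Int) := by simp only [pvF]; omega
    -- every other matching phrase occurs strictly later
    have hq : ∀ q ∈ pvPhrases, q ≠ p₀ → pvF cs q = -1 ∨ pvF cs p₀ < pvF cs q := by
      intro q hqm hne
      by_cases hq1 : PySem.Chars.find cs q.toList = -1
      · exact Or.inl hq1
      · right
        have hq0 : 0 ≤ PySem.Chars.find cs q.toList := by
          have := PySem.Chars.neg_one_le_find cs q.toList; omega
        obtain ⟨hqpre, _⟩ := PySem.Chars.find_spec hq0
        have hgeq : j₀ ≤ (PySem.Chars.find cs q.toList).toNat :=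
          Nat.find_min' hM (pvFirstMatch_isSome _ _ ⟨q, hqm, hqpre⟩)
        have hnej : (PySem.Chars.find cs q.toList).toNat ≠ j₀ := by
          intro he
          rw [he] at hqpre
          rcases List.prefix_or_prefix_of_prefix hqpre hpre with h' | h'
          · exact hne (pvPhrases_no_prefix q hqm p₀ hmem h')
          · exact hne (pvPhrases_no_prefix p₀ hmem q hqm h').symm
        simp only [pvF]
        omega
    rw [pvBestOf_min cs pvPhrases p₀ hmem (by omega) hq,
      pvScan_found j₀ cs p₀ 0 hsome hmin, hfp₀]
    simp
  · -- no phrase matches anywhere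
    push_neg at hM
    have hnone : ∀ j, pvFirstMatch pvPhrases (cs.drop j) = none := fun j =>
      Option.not_isSome_iff_eq_none.mp (by simpa using hM j)
    have hall : ∀ p ∈ pvPhrases, pvF cs p = -1 := by
      intro p hp
      rw [pvF, PySem.Chars.find_eq_neg_one_iff, ← PySem.Chars.isIn_iff_infix,
        ← PySem.Chars.exists_prefix_drop_iff_isIn]
      rintro ⟨j, hj⟩
      exact (pvFirstMatch_none_iff _ _).mp (hnone j) p hp hj
    rw [pvBestOf_none cs pvPhrases hall, pvScan_none cs hnone 0]

theorem pvA_eq_foldl (text : String) :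
    find_transition_py text =
      List.foldl (pvStep (PySem.Chars.lower text.toList)) ("", -1) pvPhrases := by
  have hfun : (fun (best : String × Int) (phrase : String) =>
      let idx := PySem.Str.find (PySem.Str.lower text) phrase
      if idx ≠ -1 then
        if best.2 = -1 ∨ idx < best.2 then (phrase, idx) else best
      else best) = pvStep (PySem.Chars.lower text.toList) := by
    funext b p
    simp only [pvStep, pvF, PySem.Str.find_eq, PySem.Str.toList_lower]
  simp only [find_transition_py]
  rw [hfun]

-- ===== VERDICT (by name: the statement is the Claim_ definition above) =====
theorem find_transition_py_spec : Claim_equal_find_transition_py := by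
  intro text _
  unfold Spec_find_transition_py find_transition_py_alt
  rw [pvA_eq_foldl, pvFoldl_eq, pvScan_eq_pvBestOf]
  rcases pvBestOf_shape (PySem.Chars.lower text.toList) pvPhrases with h | ⟨q, _, he, hne⟩
  · rw [h]; simp [pvMerge]
  · rw [he]; simp [pvMerge, hne]
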